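-- pv_equiv track=rewrite | github.com/stefano-maggiolo/pydepgraph | pydepgraph/__init__.py | build_graph_clusters
-- ===== SOURCE A (Python) =====
-- def in_package(mod, pkg):
--     """Return if mod is a subpackage of pkg.
--
--     mod (str): a module name.
--     pkg (str): a package name.
--
--     return (bool): True if mod is a subpackage of pkg.
--
--     """
--     if mod == pkg:
--         return True
--     else:
--         return mod.startswith("%s." % pkg)
--
-- def find_best_cluster(name, clusters):
--     """Return the cluster in clusters which is nearest to name.
--
--     name (str): a package name.
--     clusters ([str]): a list of cluster names.
--
--     return (str): the nearest cluster to name.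
--
--     """
--     best = None
--     for cluster in clusters:
--         if in_package(name, cluster):
--             if best is None:
--                 best = cluster
--             elif in_package(cluster, best):
--                 best = cluster
--     return best
--
-- def build_graph_clusters(graph, clusters, self_edges=False):
--     """Given a graph of packages, build a graph of clusters.
--
--     graph ({str: [str]}): a graph of packages as an adjacency matrix.
--     clusters ([str]): a list of cluster names.
--     self_edges (bool): if True, draw also self edges.
--
--     return ({str: [str]}) a graph of clusters as an adjacency matrix.
--
--     """
--     graph_clusters = {}
--     for name in graph:
--         source = find_best_cluster(name, clusters)
--         if source is None:
--             continue
--         if source not in graph_clusters: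
--             graph_clusters[source] = []
--         for name_ in graph[name]:
--             target = find_best_cluster(name_, clusters)
--             if target is not None:
--                 if self_edges or target != source:
--                     if target not in graph_clusters[source]:
--                         graph_clusters[source].append(target)
--     return graph_clusters
-- ===== SOURCE B (Python) =====
-- def build_graph_clusters(graph, clusters, self_edges=False):
--     """Cluster adjacency via longest-ancestor match: index the clusters in
--     a hash set and walk each name's dotted-ancestor chain from the longest
--     prefix down, instead of scanning the whole cluster list per name."""
--     cset = set(clusters)
--     out = {}
--     for name, deps in graph.items():
--         source = _nearest(name, cset)
--         if source is None:
--             continue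
--         row = out.setdefault(source, [])
--         for dep in deps:
--             target = _nearest(dep, cset)
--             if target is not None and (self_edges or target != source) \
--                     and target not in row:
--                 row.append(target)
--     return out
--
--
-- def _nearest(name, cset):
--     """The longest s in cset with s == name or name.startswith(s + ".");
--     such s are exactly name and its dotted ancestors, tried longest first."""
--     if name in cset:
--         return name
--     i = name.rfind(".")
--     while i >= 0:
--         if name[:i] in cset:
--             return name[:i]
--         i = name.rfind(".", 0, i)
--     return None
-- ===== Notes on version B (the rewrite author's own statement) =====
-- stated objective: faster
-- what changed: B indexes the clusters in a hash set once and finds each name's nearest cluster by walking the name's dotted-ancestor chain from the longest prefix down (longest-prefix match), instead of A's scan of the whole cluster list for every node and dependency.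
import Mathlib
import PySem

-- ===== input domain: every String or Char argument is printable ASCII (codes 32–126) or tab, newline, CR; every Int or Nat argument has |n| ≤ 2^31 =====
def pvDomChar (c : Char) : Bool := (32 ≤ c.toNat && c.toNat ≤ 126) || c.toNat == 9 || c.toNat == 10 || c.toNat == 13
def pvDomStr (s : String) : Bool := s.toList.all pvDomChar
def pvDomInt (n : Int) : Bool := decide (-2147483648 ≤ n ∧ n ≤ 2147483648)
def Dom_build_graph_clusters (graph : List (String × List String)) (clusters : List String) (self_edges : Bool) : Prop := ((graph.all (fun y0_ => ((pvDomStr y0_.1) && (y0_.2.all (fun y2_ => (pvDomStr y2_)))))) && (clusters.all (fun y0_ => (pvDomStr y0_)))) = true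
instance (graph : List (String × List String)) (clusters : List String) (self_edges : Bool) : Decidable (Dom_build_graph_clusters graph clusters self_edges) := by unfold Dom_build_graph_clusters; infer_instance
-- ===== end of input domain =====

-- B (objective: faster) replaces A's scan of the whole cluster list per name by a hash
-- set of clusters plus a walk down each name's dotted-ancestor chain (longest first).

-- ===== PORT A =====
-- in_package(mod, pkg)
def pv_in_package (mod pkg : String) : Bool :=
  if mod == pkg then true else PySem.Str.startswith mod (pkg ++ ".")

-- find_best_cluster(name, clusters)
def pv_find_best_cluster (name : String) (clusters : List String) : Option String :=
  clusters.foldl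
    (fun best cluster =>
      if pv_in_package name cluster then
        match best with
        | none => some cluster
        | some b => if pv_in_package cluster b then some cluster else some b
      else best)
    none

-- the 'graph' dict argument: association list → Python dict (same step in both ports)
def build_graph_clusters (graph : List (String × List String)) (clusters : List String) (self_edges : Bool) : List (String × List String) :=
  let g : PySem.Dict String (List String) := PySem.Dict.ofList graph
  let graph_clusters : PySem.Dict String (List String) :=
    g.items.foldl
      (fun gc p =>
        match pv_find_best_cluster p.1 clusters with
        | none => gc
        | some source =>
          let gc := if gc.contains source then gc else gc.insert source []
          p.2.foldl
            (fun gc name_ =>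
              match pv_find_best_cluster name_ clusters with
              | none => gc
              | some target =>
                if self_edges || target != source then
                  if (gc.getD source []).contains target then gc
                  else gc.modify source [] (fun l => l ++ [target])
                else gc)
            gc)
      PySem.Dict.empty
  graph_clusters.items

-- ===== PORT B =====
-- name.rfind(".", 0, i): highest j < i with name[j] == '.', else None (hand-ported:
-- exact for the single-character needle "." searched right-to-left in name[0:i])
def pv_rfind_dot (cs : List Char) : Nat → Option Nat
  | 0 => none
  | i + 1 => if cs.getD i ' ' == '.' then some i else pv_rfind_dot cs i

-- the port's loop terminates because rfind returns a strictly smaller index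
theorem pv_rfind_dot_lt (cs : List Char) : ∀ i j, pv_rfind_dot cs i = some j → j < i := by
  intro i
  induction i with
  | zero => intro j h; cases h
  | succ i ih =>
    intro j h
    unfold pv_rfind_dot at h
    split at h
    · cases h; omega
    · exact Nat.lt_succ_of_lt (ih j h)

-- the while loop of _nearest; name[:i] is name.toList.take i (here 0 ≤ i < len(name), exact)
def pv_nearest_loop (cset : PySem.Set String) (cs : List Char) (i : Nat) : Option String :=
  if PySem.Set.contains cset (String.ofList (cs.take i)) then
    some (String.ofList (cs.take i))
  else
    match h : pv_rfind_dot cs i with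
    | none => none
    | some j => pv_nearest_loop cset cs j
termination_by i
decreasing_by exact pv_rfind_dot_lt cs i j h

-- _nearest(name, cset)
def pv_nearest (name : String) (cset : PySem.Set String) : Option String :=
  if PySem.Set.contains cset name then some name
  else
    match pv_rfind_dot name.toList name.toList.length with
    | none => none
    | some i => pv_nearest_loop cset name.toList i

-- 'row = out.setdefault(source, [])' + 'row.append(target)': row aliases the dict entry,
-- ported as insert-if-absent plus modify of that entry
def build_graph_clusters_alt (graph : List (String × List String)) (clusters : List String) (self_edges : Bool) : List (String × List String) :=
  let cset : PySem.Set String := PySem.Set.ofList clusters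
  let g : PySem.Dict String (List String) := PySem.Dict.ofList graph
  let out : PySem.Dict String (List String) :=
    g.items.foldl
      (fun out p =>
        match pv_nearest p.1 cset with
        | none => out
        | some source =>
          let out := if out.contains source then out else out.insert source []
          p.2.foldl
            (fun out dep =>
              match pv_nearest dep cset with
              | none => out
              | some target =>
                if (self_edges || target != source) && !((out.getD source []).contains target) then
                  out.modify source [] (fun l => l ++ [target])
                else out)
            out)
      PySem.Dict.empty
  out.items

-- ===== PRECONDITION & SPEC =====
def Spec_build_graph_clusters (graph : List (String × List String)) (clusters : List String) (self_edges : Bool) (out : List (String × List String)) : Prop := out = build_graph_clusters_alt graph clusters self_edges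
instance (graph : List (String × List String)) (clusters : List String) (self_edges : Bool) (out : List (String × List String)) : Decidable (Spec_build_graph_clusters graph clusters self_edges out) := by unfold Spec_build_graph_clusters; infer_instance

-- ===== CLAIM =====
def Claim_equal_build_graph_clusters : Prop := ∀ (graph : List (String × List String)) (clusters : List String) (self_edges : Bool), Dom_build_graph_clusters graph clusters self_edges → Spec_build_graph_clusters graph clusters self_edges (build_graph_clusters graph clusters self_edges)

-- ===== LEMMAS AND PROOFS =====

theorem pv_in_package_iff (n c : String) :
    pv_in_package n c = true ↔ (n = c ∨ (c.toList ++ ['.']) <+: n.toList) := by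
  unfold pv_in_package
  split_ifs with h
  · simp_all
  · simp only [beq_iff_eq] at h
    simp only [PySem.Str.startswith_eq, PySem.Chars.startswith_iff, String.toList_append]
    constructor
    · intro hp; right; simpa using hp
    · rintro (rfl | hp)
      · exact absurd rfl h
      · simpa using hp

theorem pv_match_chain {n c b : String} (hc : pv_in_package n c = true)
    (hb : pv_in_package n b = true) (hlt : b.toList.length < c.toList.length) :
    pv_in_package c b = true := by
  rw [pv_in_package_iff] at hc hb ⊢
  right
  rcases hc with rfl | hc
  · rcases hb with rfl | hb
    · omega
    · exact hb
  · rcases hb with rfl | hb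
    · have := hc.length_le; simp only [List.length_append, List.length_cons, List.length_nil] at this; omega
    · rcases List.prefix_or_prefix_of_prefix hb hc with h1 | h1
      · rcases List.prefix_concat_iff.1 h1 with h2 | h2
        · have : (b.toList ++ ['.']).length = (c.toList ++ ['.']).length := by rw [h2]
          simp only [List.length_append, List.length_cons, List.length_nil] at this; omega
        · exact h2
      · have := h1.length_le; simp only [List.length_append, List.length_cons, List.length_nil] at this; omega

theorem pv_ip_cases {c b : String} (h : pv_in_package c b = true) :
    c = b ∨ b.toList.length < c.toList.length := by
  rcases (pv_in_package_iff c b).1 h with rfl | hp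
  · exact Or.inl rfl
  · right; have := hp.length_le; simp only [List.length_append, List.length_cons, List.length_nil] at this; omega

-- two matching clusters of one name with the same length are the same string
theorem pv_match_uniq {n c1 c2 : String} (h1 : pv_in_package n c1 = true)
    (h2 : pv_in_package n c2 = true) (hl : c1.toList.length = c2.toList.length) : c1 = c2 := by
  rcases (pv_in_package_iff n c1).1 h1 with rfl | hp1
  · rcases (pv_in_package_iff n c2).1 h2 with rfl | hp2
    · rfl
    · exfalso
      have := hp2.length_le
      simp only [List.length_append, List.length_cons, List.length_nil] at this; omega
  · rcases (pv_in_package_iff n c2).1 h2 with rfl | hp2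
    · exfalso
      have := hp1.length_le
      simp only [List.length_append, List.length_cons, List.length_nil] at this; omega
    · have heq : c1.toList = c2.toList := by
        rcases List.prefix_or_prefix_of_prefix hp1 hp2 with hq | hq
        · have := List.IsPrefix.eq_of_length hq (by simp [hl])
          simpa using this
        · have := List.IsPrefix.eq_of_length hq (by simp [hl])
          simpa using this.symm
      exact String.toList_inj.mp heq

-- the specification both best-cluster computations satisfy
def pvIsBest (n : String) (cl : List String) : Option String → Prop
  | none => ∀ c ∈ cl, pv_in_package n c = false
  | some b => b ∈ cl ∧ pv_in_package n b = true ∧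
      ∀ c ∈ cl, pv_in_package n c = true → c.toList.length ≤ b.toList.length

theorem pvIsBest_unique {n : String} {cl : List String} {r1 r2 : Option String}
    (h1 : pvIsBest n cl r1) (h2 : pvIsBest n cl r2) : r1 = r2 := by
  cases r1 with
  | none =>
    cases r2 with
    | none => rfl
    | some b => exact absurd (h1 b h2.1) (by simp [h2.2.1])
  | some b1 =>
    cases r2 with
    | none => exact absurd (h2 b1 h1.1) (by simp [h1.2.1])
    | some b2 =>
      have l1 := h1.2.2 b2 h2.1 h2.2.1
      have l2 := h2.2.2 b1 h1.1 h1.2.1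
      exact congrArg some (pv_match_uniq h1.2.1 h2.2.1 (by omega))

def pvStepA (n : String) (best : Option String) (cluster : String) : Option String :=
  if pv_in_package n cluster then
    match best with
    | none => some cluster
    | some b => if pv_in_package cluster b then some cluster else some b
  else best

theorem pvA_fold_some (n : String) :
    ∀ (cl : List String) (b0 : String), pv_in_package n b0 = true →
    ∃ b, cl.foldl (pvStepA n) (some b0) = some b ∧ pv_in_package n b = true ∧
      (b = b0 ∨ b ∈ cl) ∧ b0.toList.length ≤ b.toList.length ∧
      ∀ c ∈ cl, pv_in_package n c = true → c.toList.length ≤ b.toList.length := by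
  intro cl
  induction cl with
  | nil => intro b0 hb0; exact ⟨b0, rfl, hb0, Or.inl rfl, le_refl _, by simp⟩
  | cons c t ih =>
    intro b0 hb0
    simp only [List.foldl_cons]
    cases hm : pv_in_package n c with
    | false =>
      have hs : pvStepA n (some b0) c = some b0 := by simp [pvStepA, hm]
      rw [hs]
      obtain ⟨b, h1, h2, h3, h4, h5⟩ := ih b0 hb0
      refine ⟨b, h1, h2, ?_, h4, ?_⟩
      · rcases h3 with h | h; exact Or.inl h; exact Or.inr (List.mem_cons_of_mem _ h)
      · intro c' hc' hmc'
        rcases List.mem_cons.1 hc' with rfl | hc'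
        · rw [hm] at hmc'; cases hmc'
        · exact h5 c' hc' hmc'
    | true =>
      cases hip : pv_in_package c b0 with
      | true =>
        have hs : pvStepA n (some b0) c = some c := by simp [pvStepA, hm, hip]
        rw [hs]
        have hlen : b0.toList.length ≤ c.toList.length := by
          rcases pv_ip_cases hip with rfl | h; exact le_refl _; omega
        obtain ⟨b, h1, h2, h3, h4, h5⟩ := ih c hm
        refine ⟨b, h1, h2, ?_, by omega, ?_⟩
        · rcases h3 with rfl | h
          · exact Or.inr (List.mem_cons_self)
          · exact Or.inr (List.mem_cons_of_mem _ h)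
        · intro c' hc' hmc'
          rcases List.mem_cons.1 hc' with rfl | hc'
          · omega
          · exact h5 c' hc' hmc'
      | false =>
        have hs : pvStepA n (some b0) c = some b0 := by simp [pvStepA, hm, hip]
        rw [hs]
        have hlen : c.toList.length ≤ b0.toList.length := by
          by_contra h
          exact absurd (pv_match_chain hm hb0 (by omega)) (by simp [hip])
        obtain ⟨b, h1, h2, h3, h4, h5⟩ := ih b0 hb0
        refine ⟨b, h1, h2, ?_, h4, ?_⟩
        · rcases h3 with h | h; exact Or.inl h; exact Or.inr (List.mem_cons_of_mem _ h)
        · intro c' hc' hmc'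
          rcases List.mem_cons.1 hc' with rfl | hc'
          · omega
          · exact h5 c' hc' hmc'

theorem pvA_isBest (n : String) : ∀ cl : List String, pvIsBest n cl (cl.foldl (pvStepA n) none) := by
  intro cl
  induction cl with
  | nil => intro c hc; cases hc
  | cons c t ih =>
    simp only [List.foldl_cons]
    cases hm : pv_in_package n c with
    | false =>
      have hs : pvStepA n none c = none := by simp [pvStepA, hm]
      rw [hs]
      cases hr : t.foldl (pvStepA n) none with
      | none =>
        rw [hr] at ih
        intro c' hc'
        rcases List.mem_cons.1 hc' with rfl | hc'
        · exact hm
        · exact ih c' hc'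
      | some b =>
        rw [hr] at ih
        refine ⟨List.mem_cons_of_mem _ ih.1, ih.2.1, ?_⟩
        intro c' hc' hmc'
        rcases List.mem_cons.1 hc' with rfl | hc'
        · rw [hm] at hmc'; cases hmc'
        · exact ih.2.2 c' hc' hmc'
    | true =>
      have hs : pvStepA n none c = some c := by simp [pvStepA, hm]
      rw [hs]
      obtain ⟨b, h1, h2, h3, h4, h5⟩ := pvA_fold_some n t c hm
      rw [h1]
      refine ⟨?_, h2, ?_⟩
      · rcases h3 with rfl | h
        · exact List.mem_cons_self
        · exact List.mem_cons_of_mem _ h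
      · intro c' hc' hmc'
        rcases List.mem_cons.1 hc' with rfl | hc'
        · omega
        · exact h5 c' hc' hmc'

-- ---- B side: rfind characterisation ----

theorem pv_rfind_dot_none (cs : List Char) :
    ∀ i, pv_rfind_dot cs i = none → ∀ k, k < i → cs.getD k ' ' ≠ '.' := by
  intro i
  induction i with
  | zero => intro _ k hk; omega
  | succ i ih =>
    intro h k hk
    unfold pv_rfind_dot at h
    split at h
    · cases h
    · rename_i hne
      rcases Nat.lt_succ_iff_lt_or_eq.1 hk with hk | rfl
      · exact ih h k hk
      · simpa using hne

theorem pv_rfind_dot_some (cs : List Char) :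
    ∀ i j, pv_rfind_dot cs i = some j →
      cs.getD j ' ' = '.' ∧ ∀ k, j < k → k < i → cs.getD k ' ' ≠ '.' := by
  intro i
  induction i with
  | zero => intro j h; cases h
  | succ i ih =>
    intro j h
    unfold pv_rfind_dot at h
    split at h
    · rename_i hdot
      cases h
      exact ⟨by simpa using hdot, fun k hk1 hk2 => by omega⟩
    · rename_i hne
      obtain ⟨h1, h2⟩ := ih j h
      have hji := pv_rfind_dot_lt cs i j h
      refine ⟨h1, fun k hk1 hk2 => ?_⟩
      rcases Nat.lt_succ_iff_lt_or_eq.1 hk2 with hk | rfl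
      · exact h2 k hk1 hk
      · simpa using hne

-- strict matches of a name are exactly its prefixes cut at a dot position
theorem pv_strict_match_iff (n c : String) :
    ((c.toList ++ ['.']) <+: n.toList) ↔
      (c.toList.length < n.toList.length ∧ n.toList.getD c.toList.length ' ' = '.' ∧
        c.toList = n.toList.take c.toList.length) := by
  have hlen1 : (c.toList ++ ['.']).length = c.toList.length + 1 := by simp
  constructor
  · intro hp
    have hlen := hp.length_le
    rw [hlen1] at hlen
    have hlt : c.toList.length < n.toList.length := by omega
    have htake := List.prefix_iff_eq_take.1 hp
    rw [hlen1] at htake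
    have hsucc : n.toList.take (c.toList.length + 1) =
        n.toList.take c.toList.length ++ (n.toList[c.toList.length]?).toList := List.take_add_one
    rw [List.getElem?_eq_getElem hlt] at hsucc
    have h2 : c.toList ++ ['.'] = n.toList.take c.toList.length ++ [n.toList[c.toList.length]] := by
      rw [htake, hsucc]; simp
    have hlen2 : c.toList.length = (n.toList.take c.toList.length).length := by
      rw [List.length_take]; omega
    obtain ⟨ha, hb⟩ := List.append_inj h2 hlen2
    refine ⟨hlt, ?_, ha⟩
    rw [List.getD_eq_getElem?_getD, List.getElem?_eq_getElem hlt]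
    simpa using hb.symm
  · rintro ⟨hlt, hdot, htake⟩
    rw [List.prefix_iff_eq_take, hlen1]
    have hsucc : n.toList.take (c.toList.length + 1) =
        n.toList.take c.toList.length ++ (n.toList[c.toList.length]?).toList := List.take_add_one
    rw [List.getElem?_eq_getElem hlt] at hsucc
    have hd : n.toList[c.toList.length] = '.' := by
      rw [List.getD_eq_getElem?_getD, List.getElem?_eq_getElem hlt] at hdot
      simpa using hdot
    rw [hsucc, hd, ← htake]
    simp

-- the loop finds the longest dot-position whose prefix is in the set (below its bound)
theorem pv_nearest_loop_spec (cset : PySem.Set String) (cs : List Char) :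
    ∀ i, i < cs.length → cs.getD i ' ' = '.' →
      (∀ j, i < j → j < cs.length → cs.getD j ' ' = '.' →
        PySem.Set.contains cset (String.ofList (cs.take j)) = false) →
      (∃ jr, pv_nearest_loop cset cs i = some (String.ofList (cs.take jr)) ∧ jr < cs.length ∧
          cs.getD jr ' ' = '.' ∧
          PySem.Set.contains cset (String.ofList (cs.take jr)) = true ∧
          ∀ j, jr < j → j < cs.length → cs.getD j ' ' = '.' →
            PySem.Set.contains cset (String.ofList (cs.take j)) = false) ∨
      (pv_nearest_loop cset cs i = none ∧
        ∀ j, j < cs.length → cs.getD j ' ' = '.' →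
          PySem.Set.contains cset (String.ofList (cs.take j)) = false) := by
  intro i
  induction i using Nat.strong_induction_on with
  | _ i ih =>
    intro hlt hdot habove
    rw [pv_nearest_loop]
    cases hc : PySem.Set.contains cset (String.ofList (cs.take i)) with
    | true =>
      left
      exact ⟨i, by simp, hlt, hdot, hc, habove⟩
    | false =>
      rw [if_neg (by simp)]
      cases hr : pv_rfind_dot cs i with
      | none =>
        right
        refine ⟨rfl, ?_⟩
        intro j hj hdj
        rcases lt_trichotomy j i with h | rfl | h
        · exact absurd hdj (pv_rfind_dot_none cs i hr j h)
        · exact hc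
        · exact habove j h hj hdj
      | some j2 =>
        obtain ⟨hd2, hno⟩ := pv_rfind_dot_some cs i j2 hr
        have hj2i := pv_rfind_dot_lt cs i j2 hr
        have habove2 : ∀ j, j2 < j → j < cs.length → cs.getD j ' ' = '.' →
            PySem.Set.contains cset (String.ofList (cs.take j)) = false := by
          intro j hj1 hj2 hdj
          rcases lt_trichotomy j i with h | rfl | h
          · exact absurd hdj (hno j hj1 h)
          · exact hc
          · exact habove j h hj2 hdj
        exact ih j2 hj2i (by omega) hd2 habove2

-- helper: a string is in set(clusters) iff it is in the list
theorem pv_cset_mem (clusters : List String) (c : String) :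
    PySem.Set.contains (PySem.Set.ofList clusters) c = true ↔ c ∈ clusters := by
  rw [PySem.Set.contains_iff, PySem.Set.mem_ofList]

-- _nearest satisfies the best-cluster specification
theorem pv_nearest_isBest (name : String) (clusters : List String) :
    pvIsBest name clusters (pv_nearest name (PySem.Set.ofList clusters)) := by
  unfold pv_nearest
  cases hc : PySem.Set.contains (PySem.Set.ofList clusters) name with
  | true =>
    rw [if_pos rfl]
    refine ⟨(pv_cset_mem clusters name).1 hc, (pv_in_package_iff name name).2 (Or.inl rfl), ?_⟩
    intro c _ hmc
    rcases pv_ip_cases hmc with rfl | h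
    · exact le_refl _
    · omega
  | false =>
    rw [if_neg (by simp)]
    have hname_notmem : name ∉ clusters := fun h => by
      rw [(pv_cset_mem clusters name).2 h] at hc; cases hc
    cases hr : pv_rfind_dot name.toList name.toList.length with
    | none =>
      show pvIsBest name clusters none
      intro c hcm
      cases hm : pv_in_package name c with
      | false => rfl
      | true =>
        exfalso
        rcases (pv_in_package_iff name c).1 hm with rfl | hp
        · exact hname_notmem hcm
        · obtain ⟨hlt, hdot, _⟩ := (pv_strict_match_iff name c).1 hp
          exact pv_rfind_dot_none name.toList name.toList.length hr c.toList.length hlt hdot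
    | some i =>
      show pvIsBest name clusters (pv_nearest_loop (PySem.Set.ofList clusters) name.toList i)
      obtain ⟨hdot, hno⟩ := pv_rfind_dot_some name.toList name.toList.length i hr
      have hi := pv_rfind_dot_lt name.toList name.toList.length i hr
      have habove : ∀ j, i < j → j < name.toList.length → name.toList.getD j ' ' = '.' →
          PySem.Set.contains (PySem.Set.ofList clusters) (String.ofList (name.toList.take j)) = false := by
        intro j hj1 hj2 hdj
        exact absurd hdj (hno j hj1 hj2)
      rcases pv_nearest_loop_spec (PySem.Set.ofList clusters) name.toList i hi hdot habove with
        ⟨jr, heq, hjr, hdjr, hin, hmax⟩ | ⟨heq, hnone⟩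
      · rw [heq]
        have hplist : (String.ofList (name.toList.take jr)).toList = name.toList.take jr := by
          simp
        have hplen : (String.ofList (name.toList.take jr)).toList.length = jr := by
          rw [hplist, List.length_take]; omega
        refine ⟨(pv_cset_mem clusters _).1 hin, ?_, ?_⟩
        · refine (pv_in_package_iff name _).2 (Or.inr ?_)
          refine (pv_strict_match_iff name _).2 ⟨by omega, ?_, ?_⟩
          · rw [hplen]; exact hdjr
          · rw [hplen, hplist]
        · intro c hcm hmc
          rcases (pv_in_package_iff name c).1 hmc with rfl | hp
          · exact absurd hcm hname_notmem
          · obtain ⟨hlt, hdotc, htakec⟩ := (pv_strict_match_iff name c).1 hp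
            rw [hplen]
            by_contra hgt
            have hjlt : jr < c.toList.length := by omega
            have : PySem.Set.contains (PySem.Set.ofList clusters)
                (String.ofList (name.toList.take c.toList.length)) = false :=
              hmax c.toList.length hjlt hlt hdotc
            rw [← htakec, String.ofList_toList, (pv_cset_mem clusters c).2 hcm] at this
            cases this
      · rw [heq]
        intro c hcm
        cases hm : pv_in_package name c with
        | false => rfl
        | true =>
          exfalso
          rcases (pv_in_package_iff name c).1 hm with rfl | hp
          · exact hname_notmem hcm
          · obtain ⟨hlt, hdotc, htakec⟩ := (pv_strict_match_iff name c).1 hp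
            have := hnone c.toList.length hlt hdotc
            rw [← htakec, String.ofList_toList, (pv_cset_mem clusters c).2 hcm] at this
            cases this

-- the two best-cluster computations agree on every name
theorem pv_nearest_eq (name : String) (clusters : List String) :
    pv_nearest name (PySem.Set.ofList clusters) = pv_find_best_cluster name clusters := by
  have hA : pv_find_best_cluster name clusters = clusters.foldl (pvStepA name) none := rfl
  rw [hA]
  exact pvIsBest_unique (pv_nearest_isBest name clusters) (pvA_isBest name clusters)

-- the whole pass of B computes A's fold once the lookups are rewritten
theorem pv_main_eq (graph : List (String × List String)) (clusters : List String)
    (self_edges : Bool) :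
    build_graph_clusters graph clusters self_edges = build_graph_clusters_alt graph clusters self_edges := by
  unfold build_graph_clusters build_graph_clusters_alt
  refine congrArg PySem.Dict.items ?_
  refine PySem.List.foldl_congr_mem _ _ _ _ ?_
  intro gc p _
  rw [pv_nearest_eq]
  cases hsrc : pv_find_best_cluster p.1 clusters with
  | none => rfl
  | some source =>
    refine PySem.List.foldl_congr_mem _ _ _ _ ?_
    intro gc' d _
    rw [pv_nearest_eq]
    cases htgt : pv_find_best_cluster d clusters with
    | none => rfl
    | some target =>
      show (if self_edges || target != source then
              if (gc'.getD source []).contains target then gc'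
              else gc'.modify source [] (fun l => l ++ [target])
            else gc') =
           (if (self_edges || target != source) && !((gc'.getD source []).contains target) then
              gc'.modify source [] (fun l => l ++ [target])
            else gc')
      cases h1 : (self_edges || target != source) <;>
        cases h2 : (gc'.getD source []).contains target <;> simp [*]

-- ===== VERDICT =====
theorem build_graph_clusters_spec : Claim_equal_build_graph_clusters := by
  intro graph clusters self_edges _
  unfold Spec_build_graph_clusters
  exact pv_main_eq graph clusters self_edges
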